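-- pv_equiv track=rewrite | github.com/Likhixang/dice_bot | game_settle.py | calculate_score_with_details
-- ===== SOURCE A (Python) =====
-- from collections import Counter
--
-- def calculate_score_with_details(dice_list):
--     if not dice_list:
--         return 0, "无"
--     if -1 in dice_list:
--         return 0, "🚫 逃跑判负"
--
--     base_sum = sum(dice_list)
--     counts = Counter(dice_list)
--     pair_bonus = sum(count - 1 for count in counts.values() if count >= 2)
--     is_straight = len(counts) == len(dice_list) > 2 and (max(dice_list) - min(dice_list) == len(dice_list) - 1)
--
--     detail_str = f"底{base_sum}"
--     total = base_sum + pair_bonus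
--     if pair_bonus > 0:
--         detail_str += f"+同点{pair_bonus}"
--     if is_straight:
--         total *= 2
--         detail_str = f"({detail_str})x顺2"
--
--     return total % 10, detail_str
-- ===== SOURCE B (Python) =====
-- def calculate_score_with_details(dice_list):
--     if not dice_list:
--         return 0, "无"
--     if -1 in dice_list:
--         return 0, "🚫 逃跑判负"
--     # Sort once, then a single adjacent-pair scan derives everything:
--     # each adjacent equal pair contributes 1 to pair_bonus, and the hand is a
--     # straight iff every adjacent step in sorted order is exactly +1 (and n > 2).
--     base_sum = 0
--     pair_bonus = 0
--     is_straight = len(dice_list) > 2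
--     prev = None
--     for x in sorted(dice_list):
--         base_sum += x
--         if prev is not None:
--             if x == prev:
--                 pair_bonus += 1
--             if x != prev + 1:
--                 is_straight = False
--         prev = x
--     detail = "底%d" % base_sum
--     if pair_bonus > 0:
--         detail += "+同点%d" % pair_bonus
--     total = base_sum + pair_bonus
--     if is_straight:
--         return total * 2 % 10, "(" + detail + ")x顺2"
--     return total % 10, detail
-- ===== Notes on version B (the rewrite author's own statement) =====
-- stated objective: alternative
-- what changed: Replaces the Counter tally plus per-value bonus summation and the min/max/len-based straight test with a sort-then-single-adjacent-scan: sort the dice once, then one pass counts adjacent equal pairs (the pair bonus) and checks that every adjacent step is exactly +1 (the straight).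
import Mathlib
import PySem

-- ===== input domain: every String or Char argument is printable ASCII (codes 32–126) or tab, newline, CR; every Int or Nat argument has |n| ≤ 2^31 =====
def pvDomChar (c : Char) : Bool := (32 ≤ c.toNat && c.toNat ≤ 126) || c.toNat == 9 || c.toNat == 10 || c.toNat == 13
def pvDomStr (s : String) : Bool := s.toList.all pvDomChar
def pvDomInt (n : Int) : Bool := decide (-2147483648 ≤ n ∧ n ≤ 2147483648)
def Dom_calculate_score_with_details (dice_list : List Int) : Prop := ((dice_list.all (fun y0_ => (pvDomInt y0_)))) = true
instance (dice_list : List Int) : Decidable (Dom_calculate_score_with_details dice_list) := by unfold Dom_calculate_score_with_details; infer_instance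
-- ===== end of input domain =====

-- B replaces the Counter tally + bonus summation + min/max straight test by a sort
-- followed by one adjacent-pair scan (alternative decomposition, not faster).

-- ===== PORT A =====
def calculate_score_with_details (dice_list : List Int) : Int × String :=
  if dice_list = [] then (0, "无")
  else if dice_list.contains (-1) then (0, "🚫 逃跑判负")
  else
    let base_sum : Int := dice_list.foldl (· + ·) 0
    let counts : PySem.Dict Int Int := PySem.Dict.counter dice_list
    let pair_bonus : Int := counts.values.foldl (fun acc c => if 2 ≤ c then acc + (c - 1) else acc) 0
    let is_straight : Bool :=
      (counts.size == dice_list.length) && decide (2 < dice_list.length) &&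
        (((PySem.List.max? dice_list (fun x => x)).getD 0
            - (PySem.List.min? dice_list (fun x => x)).getD 0) == (dice_list.length : Int) - 1)
    let detail_str : String := "底" ++ PySem.Int.toStr base_sum
    let total : Int := base_sum + pair_bonus
    let detail_str : String := if pair_bonus > 0 then detail_str ++ ("+同点" ++ PySem.Int.toStr pair_bonus) else detail_str
    let total : Int := if is_straight then total * 2 else total
    let detail_str : String := if is_straight then "(" ++ detail_str ++ ")x顺2" else detail_str
    (PySem.Int.mod total 10, detail_str)

-- ===== PORT B =====
def calculate_score_with_details_alt (dice_list : List Int) : Int × String :=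
  if dice_list = [] then (0, "无")
  else if dice_list.contains (-1) then (0, "🚫 逃跑判负")
  else
    let r : Int × Int × Bool × Option Int :=
      (PySem.List.sorted dice_list (fun x => x) false).foldl
        (fun st x =>
          (st.1 + x,
           (match st.2.2.2 with
            | some p => if x = p then st.2.1 + 1 else st.2.1
            | none => st.2.1),
           (match st.2.2.2 with
            | some p => if x ≠ p + 1 then false else st.2.2.1
            | none => st.2.2.1),
           some x))
        (0, 0, decide (2 < dice_list.length), none)
    let base_sum : Int := r.1
    let pair_bonus : Int := r.2.1
    let is_straight : Bool := r.2.2.1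
    let detail : String := "底" ++ PySem.Int.toStr base_sum
    let detail : String := if pair_bonus > 0 then detail ++ ("+同点" ++ PySem.Int.toStr pair_bonus) else detail
    let total : Int := base_sum + pair_bonus
    if is_straight then (PySem.Int.mod (total * 2) 10, "(" ++ detail ++ ")x顺2")
    else (PySem.Int.mod total 10, detail)

-- ===== PRECONDITION & SPEC =====
def Spec_calculate_score_with_details (dice_list : List Int) (out : Int × String) : Prop := out = calculate_score_with_details_alt dice_list
instance (dice_list : List Int) (out : Int × String) : Decidable (Spec_calculate_score_with_details dice_list out) := by unfold Spec_calculate_score_with_details; infer_instance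

-- ===== CLAIM (what is proved, stated in full; the proofs are below) =====
def Claim_equal_calculate_score_with_details : Prop := ∀ (dice_list : List Int), Dom_calculate_score_with_details dice_list → Spec_calculate_score_with_details dice_list (calculate_score_with_details dice_list)

-- ===== LEMMAS AND PROOFS =====

-- adjacent-equal-pair count of B's scan, as a recursion over the list
def pvP (prev : Option Int) : List Int → Int
  | [] => 0
  | x :: t => (match prev with | some p => if x = p then 1 else 0 | none => 0) + pvP (some x) t

-- straight flag of B's scan, as a recursion over the list
def pvS (prev : Option Int) : List Int → Bool
  | [] => true
  | x :: t => (match prev with | some p => x == p + 1 | none => true) && pvS (some x) t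

-- last element seen
def pvL (prev : Option Int) : List Int → Option Int
  | [] => prev
  | x :: t => pvL (some x) t

-- B's foldl computes (sum, adjacent-equal count, chain-of-+1 flag, last seen)
theorem pv_fold_char (l : List Int) : ∀ (bs pb : Int) (st : Bool) (prev : Option Int),
    l.foldl
      (fun st x =>
        (st.1 + x,
         (match st.2.2.2 with
          | some p => if x = p then st.2.1 + 1 else st.2.1
          | none => st.2.1),
         (match st.2.2.2 with
          | some p => if x ≠ p + 1 then false else st.2.2.1
          | none => st.2.2.1),
         some x))
      (bs, pb, st, prev)
    = (bs + l.sum, pb + pvP prev l, st && pvS prev l, pvL prev l) := by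
  induction l with
  | nil => intro bs pb st prev; simp [pvP, pvS, pvL]
  | cons x t ih =>
    intro bs pb st prev
    simp only [List.foldl_cons, ih, pvP, pvS, pvL, List.sum_cons]
    refine Prod.ext (by push_cast; ring) (Prod.ext ?_ (Prod.ext ?_ rfl))
    · cases prev with
      | none => simp
      | some p =>
        by_cases h : x = p <;> simp [h, add_assoc]
    · cases prev with
      | none => simp
      | some p =>
        by_cases h : x = p + 1 <;> simp [h]

-- sum as a foldl
theorem pv_foldl_add (l : List Int) : ∀ a : Int, l.foldl (· + ·) a = a + l.sum := by
  induction l with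
  | nil => intro a; simp
  | cons x t ih => intro a; simp [List.foldl_cons, ih, add_assoc]

-- ===== A-side closed forms (as in the Counter analysis) =====

theorem pv_sum_indicator (D : List Int) (a : Int) :
    (D.map (fun k => if k = a then (1 : Nat) else 0)).sum = D.count a := by
  induction D with
  | nil => simp
  | cons d t ih =>
    simp only [List.map_cons, List.sum_cons, List.count_cons, ih]
    by_cases h : d = a
    · subst h; simp [Nat.add_comm]
    · have h' : ¬ (a = d) := fun he => h he.symm
      simp [h]

theorem pv_sum_count (xs D : List Int) (hnd : D.Nodup) (hcov : ∀ x ∈ xs, x ∈ D) :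
    (D.map (fun k => xs.count k)).sum = xs.length := by
  induction xs with
  | nil => simp
  | cons a t ih =>
    have hcov' : ∀ x ∈ t, x ∈ D := fun x hx => hcov x (List.mem_cons_of_mem a hx)
    have ha : a ∈ D := hcov a (List.mem_cons_self)
    have hsplit : (D.map (fun k => (a :: t).count k)).sum
        = (D.map (fun k => t.count k)).sum + (D.map (fun k => if k = a then (1 : Nat) else 0)).sum := by
      rw [← List.sum_map_add]
      refine congrArg List.sum (List.map_congr_left (fun k _ => ?_))
      rw [List.count_cons]
      rcases eq_or_ne k a with h | h
      · simp [h]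
      · simp [h, Ne.symm h]
    rw [hsplit, ih hcov', pv_sum_indicator, List.count_eq_one_of_mem hnd ha]
    simp

theorem pv_bonus_fold (l : List Int) (h : ∀ c ∈ l, 1 ≤ c) (acc : Int) :
    l.foldl (fun acc c => if 2 ≤ c then acc + (c - 1) else acc) acc
      = acc + l.sum - l.length := by
  induction l generalizing acc with
  | nil => simp
  | cons c t ih =>
    have hc := h c (List.mem_cons_self)
    have ht := ih (fun x hx => h x (List.mem_cons_of_mem c hx))
    simp only [List.foldl_cons, List.sum_cons, List.length_cons]
    by_cases h2 : 2 ≤ c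
    · rw [if_pos h2, ht]; push_cast; ring
    · have hc1 : c = 1 := by omega
      rw [if_neg h2, ht, hc1]; push_cast; ring

theorem pv_counter_values (xs : List Int) :
    (PySem.Dict.counter xs).values
      = (PySem.Set.ofList xs).map (fun k => (xs.count k : Int)) := by
  simp [PySem.Dict.values, PySem.Dict.items_counter, List.map_map, Function.comp]

theorem pv_pair_bonus (xs : List Int) :
    (PySem.Dict.counter xs).values.foldl (fun acc c => if 2 ≤ c then acc + (c - 1) else acc) 0
      = (xs.length : Int) - ((PySem.Set.ofList xs).length : Int) := by
  rw [pv_counter_values]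
  have hge : ∀ c ∈ (PySem.Set.ofList xs).map (fun k => (xs.count k : Int)), 1 ≤ c := by
    intro c hc
    rcases List.mem_map.mp hc with ⟨k, hk, rfl⟩
    have : k ∈ xs := (PySem.Set.mem_ofList xs k).mp hk
    have : 0 < xs.count k := List.count_pos_iff.mpr this
    omega
  rw [pv_bonus_fold _ hge 0]
  have hsum : ((PySem.Set.ofList xs).map (fun k => (xs.count k : Int))).sum
      = (((PySem.Set.ofList xs).map (fun k => xs.count k)).sum : Nat) := by
    rw [Nat.cast_list_sum, List.map_map]; rfl
  rw [hsum, pv_sum_count xs _ (PySem.Set.nodup_ofList xs) (fun x hx => (PySem.Set.mem_ofList xs x).mpr hx)]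
  simp [List.length_map]

theorem pv_counter_size (xs : List Int) :
    (PySem.Dict.counter xs).size = (PySem.Set.ofList xs).length := by
  simp [PySem.Dict.size, PySem.Dict.items_counter]

-- distinct-element count as a Finset cardinality
theorem pv_setLength_card (xs : List Int) :
    (PySem.Set.ofList xs).length = xs.toFinset.card := by
  have hf : (PySem.Set.ofList xs).toFinset = xs.toFinset := by
    apply Finset.ext; intro a
    simp [List.mem_toFinset, PySem.Set.mem_ofList]
  rw [← hf, List.toFinset_card_of_nodup (PySem.Set.nodup_ofList xs)]

-- ===== B-side: the scan on the sorted list =====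

-- on a sorted list, the adjacent-equal count is length - number of distinct values
theorem pv_pvP_sorted (s : List Int) (hs : s.Pairwise (· ≤ ·)) :
    pvP none s = (s.length : Int) - (s.toFinset.card : Int) := by
  induction s with
  | nil => simp [pvP]
  | cons a t ih =>
    cases t with
    | nil => simp [pvP]
    | cons b t' =>
      have hst : (b :: t').Pairwise (· ≤ ·) := (List.pairwise_cons.mp hs).2
      have ihb := ih hst
      have hab : a ≤ b := (List.pairwise_cons.mp hs).1 b List.mem_cons_self
      have hP : pvP none (a :: b :: t') = (if b = a then 1 else 0) + pvP none (b :: t') := by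
        simp [pvP]
      rw [hP, ihb]
      simp only [List.toFinset_cons, List.length_cons]
      by_cases h : b = a
      · subst h
        rw [Finset.insert_idem]
        simp only [if_pos]
        push_cast; ring
      · have hnm : a ∉ (b :: t') := by
          intro hmem
          have hle : ∀ y ∈ b :: t', b ≤ y := by
            intro y hy
            rcases List.mem_cons.mp hy with rfl | hy'
            · exact le_refl _
            · exact (List.pairwise_cons.mp hst).1 y hy'
          have := hle a hmem
          have : a < b := lt_of_le_of_ne hab (fun he => h he.symm)
          omega
        have hnotin : a ∉ insert b t'.toFinset := by
          simpa using hnm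
        rw [Finset.card_insert_of_notMem hnotin]
        simp only [if_neg h]
        push_cast; ring

-- forward: a chain of +1 steps is strictly increasing and its last is head + length
theorem pv_pvS_forward (t : List Int) : ∀ a : Int, pvS (some a) t = true →
    (a :: t).Pairwise (· < ·) ∧ (a :: t).getLastD 0 = a + t.length := by
  induction t with
  | nil => intro a _; simp
  | cons b t' ih =>
    intro a h
    simp only [pvS, Bool.and_eq_true, beq_iff_eq] at h
    obtain ⟨hb, hrest⟩ := h
    obtain ⟨hpw, hlast⟩ := ih b hrest
    constructor
    · refine List.pairwise_cons.mpr ⟨?_, hpw⟩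
      intro y hy
      rcases List.mem_cons.mp hy with rfl | hy'
      · omega
      · have := (List.pairwise_cons.mp hpw).1 y hy'
        omega
    · have : (a :: b :: t').getLastD 0 = (b :: t').getLastD 0 := by simp
      rw [this, hlast, hb]
      simp [List.length_cons]; ring

-- a sorted nodup integer list grows by at least 1 per step
theorem pv_last_ge (t : List Int) : ∀ b : Int, (b :: t).Pairwise (· ≤ ·) → (b :: t).Nodup →
    b + t.length ≤ (b :: t).getLastD 0 := by
  induction t with
  | nil => intro b _ _; simp
  | cons c t' ih =>
    intro b hs hn
    have hbc : b ≤ c := (List.pairwise_cons.mp hs).1 c List.mem_cons_self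
    have hne : b ≠ c := by
      have := (List.nodup_cons.mp hn).1
      intro he; exact this (he ▸ List.mem_cons_self)
    have h1 : b + 1 ≤ c := by
      rcases lt_of_le_of_ne hbc hne with h; omega
    have := ih c (List.pairwise_cons.mp hs).2 (List.nodup_cons.mp hn).2
    have hlast : (b :: c :: t').getLastD 0 = (c :: t').getLastD 0 := by simp
    rw [hlast]
    simp only [List.length_cons]
    push_cast at *
    omega

-- backward: sorted + nodup + last = head + length forces the +1 chain
theorem pv_pvS_backward (t : List Int) : ∀ a : Int, (a :: t).Pairwise (· ≤ ·) → (a :: t).Nodup →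
    (a :: t).getLastD 0 = a + t.length → pvS (some a) t = true := by
  induction t with
  | nil => intro a _ _ _; simp [pvS]
  | cons b t' ih =>
    intro a hs hn hlast
    have hab : a ≤ b := (List.pairwise_cons.mp hs).1 b List.mem_cons_self
    have hne : a ≠ b := by
      have := (List.nodup_cons.mp hn).1
      intro he; exact this (he ▸ List.mem_cons_self)
    have h1 : a + 1 ≤ b := by rcases lt_of_le_of_ne hab hne with h; omega
    have hst : (b :: t').Pairwise (· ≤ ·) := (List.pairwise_cons.mp hs).2
    have hnt : (b :: t').Nodup := (List.nodup_cons.mp hn).2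
    have hge := pv_last_ge t' b hst hnt
    have hl2 : (a :: b :: t').getLastD 0 = (b :: t').getLastD 0 := by simp
    rw [hl2] at hlast
    simp only [List.length_cons] at hlast
    have hb : b = a + 1 := by push_cast at hlast hge ⊢; omega
    have hlast' : (b :: t').getLastD 0 = b + t'.length := by
      push_cast at hlast hge ⊢; omega
    simp only [pvS, Bool.and_eq_true, beq_iff_eq]
    exact ⟨hb, ih b hst hnt hlast'⟩

-- last of a sorted list is its maximum
theorem pv_last_max (t : List Int) : ∀ a : Int, (a :: t).Pairwise (· ≤ ·) →
    ∀ y ∈ a :: t, y ≤ (a :: t).getLastD 0 := by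
  induction t with
  | nil => intro a _ y hy; simp at hy; simp [hy]
  | cons b t' ih =>
    intro a hs y hy
    have hst : (b :: t').Pairwise (· ≤ ·) := (List.pairwise_cons.mp hs).2
    have hl : (a :: b :: t').getLastD 0 = (b :: t').getLastD 0 := by simp
    rw [hl]
    rcases List.mem_cons.mp hy with rfl | hy'
    · have hab : y ≤ b := (List.pairwise_cons.mp hs).1 b List.mem_cons_self
      exact le_trans hab (ih b hst b List.mem_cons_self)
    · exact ih b hst y hy'

theorem pv_getLastD_mem (t : List Int) : ∀ a : Int, (a :: t).getLastD 0 ∈ a :: t := by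
  induction t with
  | nil => intro a; simp
  | cons b t' ih =>
    intro a
    have hl : (a :: b :: t').getLastD 0 = (b :: t').getLastD 0 := by simp
    rw [hl]
    exact List.mem_cons_of_mem a (ih b)

-- ===== VERDICT (by name: the statement is the Claim_ definition above) =====
-- card = length iff nodup, list form
theorem pv_card_iff (l : List Int) : l.toFinset.card = l.length ↔ l.Nodup := by
  simpa using Multiset.toFinset_card_eq_card_iff_nodup (m := (l : Multiset Int))

theorem calculate_score_with_details_spec : Claim_equal_calculate_score_with_details := by
  intro xs _
  unfold Spec_calculate_score_with_details calculate_score_with_details calculate_score_with_details_alt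
  by_cases h1 : xs = []
  · simp [h1]
  rw [if_neg h1, if_neg h1]
  by_cases h2 : xs.contains (-1)
  · rw [if_pos h2, if_pos h2]
  rw [if_neg h2, if_neg h2]
  rcases hs : PySem.List.sorted xs (fun x => x) false with _ | ⟨a, t⟩
  · exact absurd ((PySem.List.sorted_eq_nil_iff xs (fun x => x) false).mp hs) h1
  have hperm : (a :: t).Perm xs := hs ▸ PySem.List.sorted_perm xs (fun x => x) false
  have hpw : (a :: t).Pairwise (· ≤ ·) := by
    have h := PySem.List.sorted_pairwise xs (fun x : Int => x)
    rw [hs] at h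
    exact h
  have hlen : (a :: t).length = xs.length := hperm.length_eq
  have hfin : (a :: t).toFinset = xs.toFinset := List.toFinset_eq_of_perm _ _ hperm
  -- base sum
  have hsum : xs.foldl (· + ·) 0 = (0 : Int) + (a :: t).sum := by
    rw [pv_foldl_add, hperm.sum_eq]
  -- pair bonus
  have hpb : (PySem.Dict.counter xs).values.foldl (fun acc c => if 2 ≤ c then acc + (c - 1) else acc) 0
      = (0 : Int) + pvP none (a :: t) := by
    rw [pv_pair_bonus, pv_pvP_sorted (a :: t) hpw, pv_setLength_card, hfin, hlen]
    ring
  -- max / min of xs are last / head of the sorted list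
  have hM : (PySem.List.max? xs (fun x => x)).getD 0 = (a :: t).getLastD 0 := by
    cases hmax : PySem.List.max? xs (fun x => x) with
    | none => exact absurd ((PySem.List.max?_eq_none_iff xs (fun x => x)).mp hmax) h1
    | some M =>
      have hMmem : M ∈ xs := PySem.List.max?_mem hmax
      have hMmax : ∀ y ∈ xs, y ≤ M := fun y hy => PySem.List.max?_isMax hmax y hy
      have hLmem : (a :: t).getLastD 0 ∈ xs := hperm.mem_iff.mp (pv_getLastD_mem t a)
      have hL : ∀ y ∈ a :: t, y ≤ (a :: t).getLastD 0 := pv_last_max t a hpw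
      have hMs : M ∈ a :: t := hperm.mem_iff.mpr hMmem
      simpa using le_antisymm (hL M hMs) (hMmax _ hLmem)
  have hm : (PySem.List.min? xs (fun x => x)).getD 0 = a := by
    cases hmin : PySem.List.min? xs (fun x => x) with
    | none => exact absurd ((PySem.List.min?_eq_none_iff xs (fun x => x)).mp hmin) h1
    | some m =>
      have hmmem : m ∈ xs := PySem.List.min?_mem hmin
      have hmmin : ∀ y ∈ xs, m ≤ y := fun y hy => PySem.List.min?_isMin hmin y hy
      have hhead : ∀ y ∈ xs, a ≤ y := fun y hy => PySem.List.key_head_sorted_le xs (fun x => x) hs y hy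
      have hams : a ∈ xs := hperm.mem_iff.mp List.mem_cons_self
      simpa using le_antisymm (hmmin a hams) (hhead m hmmem)
  -- straight flag
  have hst : (((PySem.Dict.counter xs).size == xs.length) && decide (2 < xs.length) &&
        (((PySem.List.max? xs (fun x => x)).getD 0
            - (PySem.List.min? xs (fun x => x)).getD 0) == (xs.length : Int) - 1))
      = (decide (2 < xs.length) && pvS none (a :: t)) := by
    rw [Bool.eq_iff_iff, hM, hm, pv_counter_size, pv_setLength_card]
    simp only [Bool.and_eq_true, beq_iff_eq, decide_eq_true_eq]
    have hSnone : pvS none (a :: t) = pvS (some a) t := by simp [pvS]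
    rw [hSnone]
    constructor
    · rintro ⟨⟨hcard, hn⟩, hrange⟩
      refine ⟨hn, ?_⟩
      have hnd : (a :: t).Nodup := (pv_card_iff (a :: t)).mp (by rw [hfin, hlen]; exact hcard)
      refine pv_pvS_backward t a hpw hnd ?_
      rw [← hlen] at hrange
      simp only [List.length_cons] at hrange ⊢
      push_cast at hrange ⊢
      omega
    · rintro ⟨hn, hchain⟩
      obtain ⟨hlt, hlast⟩ := pv_pvS_forward t a hchain
      have hnd : (a :: t).Nodup := hlt.imp (fun h => ne_of_lt h)
      have hcard : (a :: t).toFinset.card = (a :: t).length := List.toFinset_card_of_nodup hnd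
      refine ⟨⟨by rw [← hfin, hcard, hlen], hn⟩, ?_⟩
      rw [← hlen]
      simp only [List.length_cons] at hlast ⊢
      push_cast at hlast ⊢
      omega
  simp only [pv_fold_char, hst, hsum, hpb]
  cases hb : (decide (2 < xs.length) && pvS none (a :: t)) <;> simp
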